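-- pv_equiv track=rewrite | github.com/Deepaksaai/NLP-Project | text_rank_summarizer.py | assign_sentences_to_sections
-- ===== SOURCE A (Python) =====
-- def assign_sentences_to_sections(sentences, sections, cleaned_text):
--     """
--     IMPROVEMENT 4: Maps each sentence to the section it belongs to.
--     Uses character positions from preprocessing to figure out
--     which section each sentence falls under.
--
--     Input: sentences list, sections list from preprocessing, cleaned text
--     Output: list of section indices (one per sentence, -1 if before first section)
--     """
--
--     section_starts = [(s['start'], i) for i, s in enumerate(sections)]
--     section_starts.sort()
--
--     sentence_sections = []
--     search_start = 0
--
--     for sentence in sentences: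
--         pos = cleaned_text.find(sentence[:60], search_start)
--         if pos == -1:
--             pos = cleaned_text.find(sentence[:40])
--         if pos == -1:
--             pos = search_start
--
--         assigned = -1
--         for sec_start, sec_idx in section_starts:
--             if sec_start <= pos:
--                 assigned = sec_idx
--             else:
--                 break
--
--         sentence_sections.append(assigned)
--         search_start = max(0, pos - 50)
--
--     return sentence_sections
-- ===== SOURCE B (Python) =====
-- def assign_sentences_to_sections(sentences, sections, cleaned_text):
--     # Sort (start, index) pairs once, then answer each "largest start <= pos"
--     # query by binary search instead of A's linear scan over the sections.
--     order = sorted((s['start'], i) for i, s in enumerate(sections))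
--     starts = [p[0] for p in order]
--     idxs = [p[1] for p in order]
--     n = len(starts)
--
--     result = []
--     search_start = 0
--     for sentence in sentences:
--         pos = cleaned_text.find(sentence[:60], search_start)
--         if pos == -1:
--             pos = cleaned_text.find(sentence[:40])
--         if pos == -1:
--             pos = search_start
--
--         lo, hi = 0, n
--         while lo < hi:
--             mid = (lo + hi) // 2
--             if starts[mid] <= pos:
--                 lo = mid + 1
--             else:
--                 hi = mid
--         result.append(idxs[lo - 1] if lo > 0 else -1)
--
--         search_start = max(0, pos - 50)
--     return result
-- ===== Notes on version B (the rewrite author's own statement) =====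
-- stated objective: alternative
-- what changed: The per-sentence linear scan over the sorted (start, index) pairs is replaced by a hand-written binary search (bisect_right) over a pre-split starts list, with the index read off a parallel idxs list.
import Mathlib
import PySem

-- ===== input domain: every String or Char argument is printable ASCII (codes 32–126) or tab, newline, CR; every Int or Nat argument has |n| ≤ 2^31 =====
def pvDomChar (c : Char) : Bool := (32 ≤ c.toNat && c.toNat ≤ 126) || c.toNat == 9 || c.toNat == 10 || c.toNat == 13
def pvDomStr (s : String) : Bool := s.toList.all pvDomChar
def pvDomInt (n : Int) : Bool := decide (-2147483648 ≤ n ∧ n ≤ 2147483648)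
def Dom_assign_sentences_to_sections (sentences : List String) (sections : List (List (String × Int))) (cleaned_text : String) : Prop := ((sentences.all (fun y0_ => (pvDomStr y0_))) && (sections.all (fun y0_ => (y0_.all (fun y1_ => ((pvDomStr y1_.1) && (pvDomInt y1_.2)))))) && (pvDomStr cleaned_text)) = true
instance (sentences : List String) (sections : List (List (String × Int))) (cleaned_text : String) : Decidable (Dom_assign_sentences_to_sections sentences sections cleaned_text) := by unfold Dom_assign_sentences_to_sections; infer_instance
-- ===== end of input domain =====

-- B replaces A's per-sentence linear scan over the sorted (start, index) pairs by a
-- binary search over a pre-split starts list (objective: alternative algorithm for the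
-- section lookup); the sentence-locating outer loop is behaviourally the same in both.

-- ===== PORT A =====

-- s['start'] : first match in the association list; the default is never reached inside
-- Pre_ (which requires every section to contain the key "start"; otherwise A raises KeyError).
def pvLookupStart (s : List (String × Int)) : Int :=
  ((s.find? (fun p => p.1 == "start")).map (fun p => p.2)).getD 0

-- the inner 'for sec_start, sec_idx in section_starts: if sec_start <= pos: assigned = sec_idx else: break'
def pvScanSecs : List (Int × Int) → Int → Int → Int
  | [], _, assigned => assigned
  | (s, i) :: rest, pos, assigned =>
    if s ≤ pos then pvScanSecs rest pos i else assigned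

def pvPos (cleaned_text : String) (sentence : String) (search_start : Int) : Int :=
  let pos0 := PySem.Str.findFrom cleaned_text (PySem.Str.slice sentence none (some 60)) search_start
  let pos1 := if pos0 = -1 then PySem.Str.find cleaned_text (PySem.Str.slice sentence none (some 40)) else pos0
  if pos1 = -1 then search_start else pos1

def pvLoopA (cleaned_text : String) (ss : List (Int × Int)) : List String → Int → List Int
  | [], _ => []
  | sentence :: rest, search_start =>
    let pos := pvPos cleaned_text sentence search_start
    pvScanSecs ss pos (-1) :: pvLoopA cleaned_text ss rest (max 0 (pos - 50))

def assign_sentences_to_sections (sentences : List String) (sections : List (List (String × Int))) (cleaned_text : String) : List Int :=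
  let section_starts := PySem.List.sorted2
    ((PySem.List.enumerate sections).map (fun p => (pvLookupStart p.2, p.1))) Prod.fst Prod.snd
  pvLoopA cleaned_text section_starts sentences 0

-- ===== PORT B =====

-- the hand-written bisect_right loop of Source B ('while lo < hi: …'); starts[mid] is
-- exact via getD: the loop invariant keeps mid < starts.length at every real call
def pvBsr (starts : List Int) (pos : Int) (lo hi : Nat) : Nat :=
  if h : lo < hi then
    let mid := (lo + hi) / 2
    if starts.getD mid 0 ≤ pos then pvBsr starts pos (mid + 1) hi
    else pvBsr starts pos lo mid
  else lo
termination_by hi - lo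
decreasing_by all_goals omega

def pvStepB (cleaned_text : String) (starts idxs : List Int) (st : List Int × Int) (sentence : String) : List Int × Int :=
  let pos := pvPos cleaned_text sentence st.2
  let lo := pvBsr starts pos 0 starts.length
  let a := if 0 < lo then (PySem.List.pyGet? idxs ((lo : Int) - 1)).getD (-1) else -1
  (st.1 ++ [a], max 0 (pos - 50))

def assign_sentences_to_sections_alt (sentences : List String) (sections : List (List (String × Int))) (cleaned_text : String) : List Int :=
  let order := PySem.List.sorted2
    ((PySem.List.enumerate sections).map (fun p => (pvLookupStart p.2, p.1))) Prod.fst Prod.snd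
  let starts := order.map Prod.fst
  let idxs := order.map Prod.snd
  (sentences.foldl (pvStepB cleaned_text starts idxs) ([], 0)).1

-- ===== PRECONDITION & SPEC =====
-- Pre_ excludes only sections lacking the key "start", on which A raises KeyError.
def Pre_assign_sentences_to_sections (sentences : List String) (sections : List (List (String × Int))) (cleaned_text : String) : Prop :=
  (sections.all (fun s => s.any (fun p => p.1 == "start"))) = true
instance (sentences : List String) (sections : List (List (String × Int))) (cleaned_text : String) : Decidable (Pre_assign_sentences_to_sections sentences sections cleaned_text) := by unfold Pre_assign_sentences_to_sections; infer_instance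

def pvWitness_assign_sentences_to_sections : List String × (List (List (String × Int))) × String :=
  (["ab cd", "cd"], [[("start", 0)], [("start", 3)]], "ab cd")

def Spec_assign_sentences_to_sections (sentences : List String) (sections : List (List (String × Int))) (cleaned_text : String) (out : List Int) : Prop := out = assign_sentences_to_sections_alt sentences sections cleaned_text
instance (sentences : List String) (sections : List (List (String × Int))) (cleaned_text : String) (out : List Int) : Decidable (Spec_assign_sentences_to_sections sentences sections cleaned_text out) := by unfold Spec_assign_sentences_to_sections; infer_instance

-- ===== CLAIM (what is proved, stated in full; the proofs are below) =====
def Claim_equal_assign_sentences_to_sections : Prop := ∀ (sentences : List String) (sections : List (List (String × Int))) (cleaned_text : String), Dom_assign_sentences_to_sections sentences sections cleaned_text → Pre_assign_sentences_to_sections sentences sections cleaned_text → Spec_assign_sentences_to_sections sentences sections cleaned_text (assign_sentences_to_sections sentences sections cleaned_text)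

-- ===== LEMMAS AND PROOFS =====

-- the sorted2 output is weakly increasing in its first component
theorem pv_insertBy_pairwise_fst (x : Int × Int) (l : List (Int × Int))
    (hl : l.Pairwise (fun a b => a.1 ≤ b.1)) :
    (PySem.List.insertBy (fun a b => decide (a.1 < b.1) || (!decide (b.1 < a.1) && decide (a.2 < b.2))) x l).Pairwise
      (fun a b => a.1 ≤ b.1) := by
  induction l with
  | nil => simp [PySem.List.insertBy]
  | cons y ys ih =>
    rw [List.pairwise_cons] at hl
    obtain ⟨hy, hys⟩ := hl
    by_cases hb : (decide (x.1 < y.1) || (!decide (y.1 < x.1) && decide (x.2 < y.2))) = true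
    · simp only [PySem.List.insertBy, hb, if_pos]
      have hxy : x.1 ≤ y.1 := by
        simp only [Bool.or_eq_true, Bool.and_eq_true, Bool.not_eq_true', decide_eq_true_eq, decide_eq_false_iff_not] at hb
        rcases hb with h | ⟨h, _⟩ <;> omega
      refine List.Pairwise.cons ?_ (List.Pairwise.cons hy hys)
      intro z hz
      rcases List.mem_cons.mp hz with rfl | hz
      · exact hxy
      · exact le_trans hxy (hy z hz)
    · simp only [PySem.List.insertBy, hb, if_neg, Bool.not_eq_true]
      refine List.Pairwise.cons ?_ (ih hys)
      intro z hz
      rcases (PySem.List.mem_insertBy _ x z ys).mp hz with rfl | hz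
      · simp only [Bool.or_eq_true, Bool.and_eq_true, Bool.not_eq_true', decide_eq_true_eq, decide_eq_false_iff_not, not_or, not_and] at hb
        omega
      · exact hy z hz

theorem pv_sorted2_pairwise_fst (xs : List (Int × Int)) :
    (PySem.List.sorted2 xs Prod.fst Prod.snd).Pairwise (fun a b => a.1 ≤ b.1) := by
  show (List.foldl _ [] xs).Pairwise _
  suffices h : ∀ (acc : List (Int × Int)), acc.Pairwise (fun a b => a.1 ≤ b.1) →
      (List.foldl (fun acc x => PySem.List.insertBy (fun a b => decide (a.1 < b.1) || (!decide (b.1 < a.1) && decide (a.2 < b.2))) x acc) acc xs).Pairwise (fun a b => a.1 ≤ b.1) by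
    exact h [] (by simp)
  induction xs with
  | nil => intro acc h; exact h
  | cons x xs ih =>
    intro acc h
    exact ih _ (pv_insertBy_pairwise_fst x acc h)

-- the length of a takeWhile prefix is pinned by its endpoint properties
theorem pv_takeWhile_length_eq {α : Type} (p : α → Bool) (l : List α) (k : Nat)
    (hk : k ≤ l.length)
    (h1 : ∀ j (hj : j < l.length), j < k → p l[j] = true)
    (h2 : ∀ (hj : k < l.length), p l[k] = false) :
    (l.takeWhile p).length = k := by
  induction l generalizing k with
  | nil =>
    simp only [List.length_nil] at hk
    simp only [List.takeWhile_nil, List.length_nil]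
    omega
  | cons a l ih =>
    cases k with
    | zero =>
      have := h2 (by simp)
      simp at this ⊢
      simp [this]
    | succ k =>
      have ha : p a = true := h1 0 (by simp) (by omega)
      simp only [List.takeWhile_cons, ha, if_pos, List.length_cons]
      rw [ih k (by simpa using hk)
        (fun j hj hjk => h1 (j+1) (by simpa using hj) (by omega))
        (fun hj => h2 (by simpa using hj))]

-- pvBsr computes the takeWhile length on a sorted list (fuel d bounds hi - lo)
theorem pv_bsr_eq (starts : List Int) (pos : Int)
    (hsort : starts.Pairwise (fun a b => a ≤ b)) :
    ∀ (d lo hi : Nat), hi - lo ≤ d → lo ≤ hi → hi ≤ starts.length →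
    (∀ j (hj : j < starts.length), j < lo → starts[j] ≤ pos) →
    (∀ j (hj : j < starts.length), hi ≤ j → pos < starts[j]) →
    pvBsr starts pos lo hi = (starts.takeWhile (fun s => decide (s ≤ pos))).length := by
  intro d
  induction d with
  | zero =>
    intro lo hi hfuel hlohi hhi hlo hhiP
    have hEq : lo = hi := by omega
    rw [pvBsr]
    simp only [show ¬ lo < hi by omega, dif_neg, not_false_iff]
    refine (pv_takeWhile_length_eq _ _ lo (by omega) ?_ ?_).symm
    · intro j hj hjlo; simpa using hlo j hj hjlo
    · intro hj; simpa using (hhiP lo hj (by omega)).not_ge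
  | succ d ih =>
    intro lo hi hfuel hlohi hhi hlo hhiP
    rw [pvBsr]
    by_cases hlt : lo < hi
    · simp only [hlt, dif_pos]
      have hmid : (lo + hi) / 2 < starts.length := by omega
      have hgetD : starts.getD ((lo + hi) / 2) 0 = starts[(lo + hi) / 2] :=
        List.getD_eq_getElem starts 0 hmid
      by_cases hle : starts.getD ((lo + hi) / 2) 0 ≤ pos
      · simp only [hle, if_pos]
        refine ih ((lo + hi) / 2 + 1) hi (by omega) (by omega) hhi ?_ hhiP
        intro j hj hjm
        have : starts[j] ≤ starts[(lo + hi) / 2] := by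
          rcases Nat.lt_or_ge j ((lo + hi) / 2) with h | h
          · exact (List.pairwise_iff_getElem.mp hsort) j _ hj hmid h
          · have : j = (lo + hi) / 2 := by omega
            subst this; exact le_refl _
        rw [hgetD] at hle; omega
      · simp only [hle, if_neg, not_false_iff]
        refine ih lo ((lo + hi) / 2) (by omega) (by omega) (by omega) hlo ?_
        intro j hj hjm
        rw [hgetD] at hle
        have : starts[(lo + hi) / 2] ≤ starts[j] := by
          rcases Nat.lt_or_ge ((lo + hi) / 2) j with h | h
          · exact (List.pairwise_iff_getElem.mp hsort) _ j hmid hj h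
          · have : j = (lo + hi) / 2 := by omega
            subst this; exact le_refl _
        omega
    · simp only [hlt, dif_neg, not_false_iff]
      have hEq : lo = hi := by omega
      refine (pv_takeWhile_length_eq _ _ lo (by omega) ?_ ?_).symm
      · intro j hj hjlo; simpa using hlo j hj hjlo
      · intro hj; simpa using (hhiP lo hj (by omega)).not_ge

-- A's inner scan is the fold over the takeWhile prefix
theorem pv_scan_eq_foldl (L : List (Int × Int)) (pos : Int) :
    ∀ acc, pvScanSecs L pos acc =
      (L.takeWhile (fun q => decide (q.1 ≤ pos))).foldl (fun _ q => q.2) acc := by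
  induction L with
  | nil => intro acc; simp [pvScanSecs]
  | cons a rest ih =>
    intro acc
    obtain ⟨s, i⟩ := a
    by_cases h : s ≤ pos
    · simp only [pvScanSecs, h, if_pos, List.takeWhile_cons]
      exact ih i
    · simp [pvScanSecs, h]

theorem pv_foldl_snd (tw : List (Int × Int)) :
    ∀ acc, tw.foldl (fun _ q => q.2) acc = (tw.map Prod.snd).getLastD acc := by
  induction tw with
  | nil => intro acc; simp
  | cons a rest ih =>
    intro acc
    simp only [List.foldl_cons, List.map_cons, List.getLastD_cons]
    exact ih a.2

-- the inner loop of A and the binary-search lookup of B agree on a fst-sorted list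
theorem pv_inner_eq (ss : List (Int × Int))
    (hsort : ss.Pairwise (fun a b => a.1 ≤ b.1)) (pos : Int) :
    pvScanSecs ss pos (-1) =
      (if 0 < pvBsr (ss.map Prod.fst) pos 0 (ss.map Prod.fst).length then
        (PySem.List.pyGet? (ss.map Prod.snd) ((pvBsr (ss.map Prod.fst) pos 0 (ss.map Prod.fst).length : Int) - 1)).getD (-1)
      else -1) := by
  have hsort' : (ss.map Prod.fst).Pairwise (fun a b => a ≤ b) :=
    List.pairwise_map.mpr hsort
  have hk : pvBsr (ss.map Prod.fst) pos 0 (ss.map Prod.fst).length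
      = ((ss.map Prod.fst).takeWhile (fun s => decide (s ≤ pos))).length := by
    refine pv_bsr_eq _ pos hsort' (ss.map Prod.fst).length 0 _ (by omega) (by omega)
      (le_refl _) (by omega) (by omega)
  have htwmap : (ss.map Prod.fst).takeWhile (fun s => decide (s ≤ pos))
      = (ss.takeWhile (fun q => decide (q.1 ≤ pos))).map Prod.fst := by
    rw [List.takeWhile_map]; rfl
  set tw := ss.takeWhile (fun q => decide (q.1 ≤ pos)) with htw
  have hkt : pvBsr (ss.map Prod.fst) pos 0 (ss.map Prod.fst).length = tw.length := by
    rw [hk, htwmap, List.length_map]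
  have hpre : tw <+: ss := List.takeWhile_prefix _
  have hlen : tw.length ≤ ss.length := hpre.length_le
  rw [pv_scan_eq_foldl, pv_foldl_snd, ← htw, hkt]
  rcases Nat.eq_zero_or_pos tw.length with h0 | hpos
  · rw [h0]
    simp only [Nat.lt_irrefl, if_neg, not_false_iff]
    have : tw = [] := List.length_eq_zero_iff.mp h0
    rw [this]; simp
  · simp only [hpos, if_pos]
    have hlt : tw.length - 1 < tw.length := by omega
    have hlt' : tw.length - 1 < ss.length := by omega
    have hcast : ((tw.length : Int) - 1) = ((tw.length - 1 : Nat) : Int) := by omega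
    rw [hcast, PySem.List.pyGet?_natCast]
    have hget : (ss.map Prod.snd)[tw.length - 1]? = some (ss[tw.length - 1].2) := by
      rw [List.getElem?_eq_getElem (by simpa using hlt')]
      simp
    rw [hget]
    simp only [Option.getD_some]
    -- LHS: getLastD of the nonempty mapped prefix
    have hmaplen : (tw.map Prod.snd).length = tw.length := List.length_map ..
    have hne : tw.map Prod.snd ≠ [] := by
      intro h; rw [h] at hmaplen; simp at hmaplen; omega
    rw [List.getLastD_eq_getLast? , List.getLast?_eq_getElem?]
    rw [hmaplen, List.getElem?_eq_getElem (by rw [hmaplen]; omega)]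
    simp only [Option.getD_some, List.getElem_map]
    exact hpre.getElem hlt ▸ rfl

-- outer loop: B's foldl accumulates exactly A's list
theorem pv_outer_eq (cleaned_text : String) (ss : List (Int × Int))
    (hsort : ss.Pairwise (fun a b => a.1 ≤ b.1)) :
    ∀ (rest : List String) (acc : List Int) (s : Int),
      (rest.foldl (pvStepB cleaned_text (ss.map Prod.fst) (ss.map Prod.snd)) (acc, s)).1
        = acc ++ pvLoopA cleaned_text ss rest s := by
  intro rest
  induction rest with
  | nil => intro acc s; simp [pvLoopA]
  | cons sentence rest ih =>
    intro acc s
    rw [List.foldl_cons]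
    show (rest.foldl _ (pvStepB cleaned_text (ss.map Prod.fst) (ss.map Prod.snd) (acc, s) sentence)).1 = _
    rw [pvLoopA]
    have hstep : pvStepB cleaned_text (ss.map Prod.fst) (ss.map Prod.snd) (acc, s) sentence
        = (acc ++ [pvScanSecs ss (pvPos cleaned_text sentence s) (-1)],
           max 0 (pvPos cleaned_text sentence s - 50)) := by
      rw [pvStepB]
      rw [pv_inner_eq ss hsort (pvPos cleaned_text sentence s)]
    rw [hstep, ih]
    simp

-- ===== VERDICT (by name: the statement is the Claim_ definition above) =====
theorem assign_sentences_to_sections_spec : Claim_equal_assign_sentences_to_sections := by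
  intro sentences sections cleaned_text _ _
  show assign_sentences_to_sections sentences sections cleaned_text
    = assign_sentences_to_sections_alt sentences sections cleaned_text
  unfold assign_sentences_to_sections assign_sentences_to_sections_alt
  rw [pv_outer_eq cleaned_text _ (pv_sorted2_pairwise_fst _) sentences [] 0]
  simp
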